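-- pv_equiv track=rewrite | github.com/cppalliance/wg21-paperlint | paperlint/pipeline.py | normalized_char_offset_map
-- ===== SOURCE A (Python) =====
-- def normalized_char_offset_map(source_text: str) -> tuple[str, list[int]]:
--     """Build ``' '.join(source_text.split())`` and map each normalized index to ``source_text``."""
--     parts = source_text.split()
--     if not parts:
--         return "", []
--     norm_to_orig: list[int] = []
--     pos = 0
--     for pi, part in enumerate(parts):
--         idx = source_text.find(part, pos)
--         if idx < 0:
--             raise RuntimeError("internal error: split() token not found in source_text")
--         if pi > 0:
--             ws_start = idx - 1
--             while ws_start >= pos and source_text[ws_start] in " \t\n\r":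
--                 ws_start -= 1
--             ws_start += 1
--             norm_to_orig.append(ws_start)
--         for k in range(len(part)):
--             norm_to_orig.append(idx + k)
--         pos = idx + len(part)
--     source_norm = " ".join(parts)
--     if len(norm_to_orig) != len(source_norm):
--         raise RuntimeError(
--             f"internal error: norm map length {len(norm_to_orig)} vs norm len {len(source_norm)}"
--         )
--     return source_norm, norm_to_orig
-- ===== SOURCE B (Python) =====
-- def normalized_char_offset_map(source_text: str) -> tuple[str, list[int]]:
--     """Build ``' '.join(source_text.split())`` and map each normalized index to ``source_text``."""
--     norm_chars: list[str] = []
--     offsets: list[int] = []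
--     run_start = None  # start of the whitespace run following the last emitted token
--     for i, c in enumerate(source_text):
--         if c.isspace():
--             if norm_chars and run_start is None:
--                 run_start = i
--         else:
--             if run_start is not None:
--                 norm_chars.append(" ")
--                 offsets.append(run_start)
--                 run_start = None
--             norm_chars.append(c)
--             offsets.append(i)
--     return "".join(norm_chars), offsets
-- ===== Notes on version B (the rewrite author's own statement) =====
-- stated objective: alternative
-- what changed: A tokenizes with split(), re-locates each token with find() and backtracks with an inner while-loop over the preceding whitespace; B is a single forward pass over enumerate(source_text) that keeps (norm_chars, offsets, run_start) and never calls split/find.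
import Mathlib
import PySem

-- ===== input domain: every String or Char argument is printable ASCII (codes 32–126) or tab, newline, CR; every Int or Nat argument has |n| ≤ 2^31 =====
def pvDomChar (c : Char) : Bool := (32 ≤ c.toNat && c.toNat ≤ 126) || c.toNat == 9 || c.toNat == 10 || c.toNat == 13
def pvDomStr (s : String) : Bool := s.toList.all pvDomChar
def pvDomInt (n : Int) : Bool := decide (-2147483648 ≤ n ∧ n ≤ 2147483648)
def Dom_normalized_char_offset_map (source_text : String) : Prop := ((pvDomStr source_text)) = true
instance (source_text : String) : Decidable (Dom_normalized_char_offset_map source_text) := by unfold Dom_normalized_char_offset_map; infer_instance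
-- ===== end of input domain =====

-- B replaces split()+find()+a backtracking while-loop with one forward pass over the characters (objective: alternative/simpler single-pass decomposition).

-- ===== PORT A =====
-- the inner `while ws_start >= pos and source_text[ws_start] in " \t\n\r": ws_start -= 1` loop, followed by `ws_start += 1`
-- (`source_text[ws_start]` is ported with pyGet?; in A it is only reached with 0 ≤ pos ≤ ws_start < len, where pyGet? is `some`)
def pvWsBack (s : String) (pos : Int) (wsStart : Int) : Int :=
  if h : pos ≤ wsStart ∧ ((PySem.Str.pyGet? s wsStart).any fun c =>
      decide (c = ' ' ∨ c = '\t' ∨ c = '\n' ∨ c = '\r')) = true then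
    pvWsBack s pos (wsStart - 1)
  else wsStart + 1
termination_by (wsStart + 1 - pos).toNat
decreasing_by omega

-- one iteration of A's `for pi, part in enumerate(parts)` loop (state: norm_to_orig, pos)
def pvStepA (source_text : String) (st : List Int × Int) (pp : Int × String) : List Int × Int :=
  let idx := PySem.Str.findFrom source_text pp.2 st.2
  if idx < 0 then st  -- unreachable (Python raises RuntimeError: split() tokens always occur at or after pos)
  else
    let acc := if 0 < pp.1 then st.1 ++ [pvWsBack source_text st.2 (idx - 1)] else st.1
    (acc ++ (PySem.List.pyRange 0 (PySem.Str.len pp.2)).map (fun k => idx + k),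
     idx + PySem.Str.len pp.2)

def normalized_char_offset_map (source_text : String) : String × List Int :=
  let parts := PySem.Str.split₀ source_text
  if parts = [] then ("", [])
  else
    let st := (PySem.List.enumerate parts 0).foldl (pvStepA source_text) ([], 0)
    let source_norm := PySem.Str.join " " parts
    if (st.1.length : Int) ≠ PySem.Str.len source_norm then ("", [])  -- unreachable (Python raises RuntimeError: the lengths always agree)
    else (source_norm, st.1)

-- ===== PORT B =====
-- Source B: one forward pass over enumerate(source_text); ''.join of the collected chars is ported as String.ofList
-- one iteration of B's `for i, c in enumerate(source_text)` loop (state: norm_chars, offsets, run_start)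
def pvStepB (st : List Char × List Int × Option Int) (ic : Int × Char) : List Char × List Int × Option Int :=
  if PySem.Str.isspace ic.2 then
    if !st.1.isEmpty && st.2.2.isNone then (st.1, st.2.1, some ic.1) else st
  else
    match st.2.2 with
    | some r => (st.1 ++ [' ', ic.2], st.2.1 ++ [r, ic.1], none)
    | none => (st.1 ++ [ic.2], st.2.1 ++ [ic.1], none)

def normalized_char_offset_map_alt (source_text : String) : String × List Int :=
  let st := (PySem.List.enumerate source_text.toList 0).foldl pvStepB ([], [], none)
  (String.ofList st.1, st.2.1)

-- ===== PRECONDITION & SPEC =====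
def Spec_normalized_char_offset_map (source_text : String) (out : String × List Int) : Prop := out = normalized_char_offset_map_alt source_text
instance (source_text : String) (out : String × List Int) : Decidable (Spec_normalized_char_offset_map source_text out) := by unfold Spec_normalized_char_offset_map; infer_instance

-- ===== CLAIM (what is proved, stated in full; the proofs are below) =====
def Claim_equal_normalized_char_offset_map : Prop := ∀ (source_text : String), Dom_normalized_char_offset_map source_text → Spec_normalized_char_offset_map source_text (normalized_char_offset_map source_text)

-- ===== LEMMAS AND PROOFS =====

-- abbreviation used throughout the proofs
def pvWS (c : Char) : Bool := PySem.Chars.isspace c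

-- the token structure of s: list of (absolute start position, token)
def pvLex (s : List Char) (i : Nat) : List (Nat × List Char) :=
  if h : i < s.length then
    if pvWS s[i] then pvLex s (i+1)
    else
      let t := (s.drop i).takeWhile (fun c => !pvWS c)
      (i, t) :: pvLex s (i + t.length)
  else []
termination_by s.length - i
decreasing_by
  · omega
  · have h1 : s.drop i = s[i] :: s.drop (i+1) := List.drop_eq_getElem_cons h
    have h2 : ((s.drop i).takeWhile (fun c => !pvWS c)).length ≤ (s.drop i).length :=
      (List.takeWhile_sublist _).length_le
    have h3 : 1 ≤ ((s.drop i).takeWhile (fun c => !pvWS c)).length := by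
      rw [h1, List.takeWhile_cons]
      split
      · simp
      · simp_all
    simp only [List.length_drop] at h2
    show s.length - (i + ((s.drop i).takeWhile (fun c => !pvWS c)).length) < s.length - i
    omega

-- the invariant tying a suffix of the token list to s: e is the end of the previous token,
-- strict = true ⇔ at least one token was already emitted (so the next token starts strictly after e)
def pvGood (s : List Char) : Bool → Nat → List (Nat × List Char) → Prop
  | _, e, [] => e ≤ s.length ∧ ∀ (k : Nat) (hk : k < s.length), e ≤ k → pvWS s[k] = true
  | strict, e, (p, t) :: rest =>
      (strict = true → e < p) ∧ e ≤ p ∧ p + t.length ≤ s.length ∧ t ≠ [] ∧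
      (∀ c ∈ t, pvWS c = false) ∧
      (∀ (k : Nat) (hk : k < s.length), e ≤ k → k < p → pvWS s[k] = true) ∧
      (s.drop p).take t.length = t ∧
      pvGood s true (p + t.length) rest

-- the common shape of the two results, stated over the token list
def pvRangeOffs (p n : Nat) : List Int := (List.range n).map (fun k => ((p + k : Nat) : Int))

def pvTailOffs : Nat → List (Nat × List Char) → List Int
  | _, [] => []
  | e, (p, t) :: rest => (e : Int) :: (pvRangeOffs p t.length ++ pvTailOffs (p + t.length) rest)

def pvTailNorm : List (Nat × List Char) → List Char
  | [] => []
  | (_, t) :: rest => ' ' :: (t ++ pvTailNorm rest)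


-- --- domain / character facts ---

theorem pvWsChar_mem (c : Char) (hd : pvDomChar c = true) (hw : pvWS c = true) :
    c = ' ' ∨ c = '\t' ∨ c = '\n' ∨ c = '\r' := by
  have hn : c.toNat = 32 ∨ c.toNat = 9 ∨ c.toNat = 10 ∨ c.toNat = 13 := by
    simp only [pvDomChar, Bool.or_eq_true, Bool.and_eq_true, decide_eq_true_eq, beq_iff_eq] at hd
    simp only [pvWS, PySem.Chars.isspace, Bool.or_eq_true, Bool.and_eq_true, decide_eq_true_eq] at hw
    omega
  have hofn := Char.ofNat_toNat c
  rcases hn with h | h | h | h <;> rw [h] at hofn <;>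
    [exact Or.inl (hofn ▸ rfl); exact Or.inr (Or.inl (hofn ▸ rfl));
     exact Or.inr (Or.inr (Or.inl (hofn ▸ rfl))); exact Or.inr (Or.inr (Or.inr (hofn ▸ rfl)))]

-- --- facts about pvLex ---

theorem pvGood_weaken (s : List Char) (i : Nat) (l : List (Nat × List Char))
    (hi : i < s.length) (hwsi : pvWS s[i] = true)
    (h : pvGood s false (i + 1) l) : pvGood s false i l := by
  match l with
  | [] =>
    obtain ⟨h1, h2⟩ := h
    refine ⟨by omega, ?_⟩
    intro k hk hik
    rcases Nat.eq_or_lt_of_le hik with h' | h'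
    · subst h'; exact hwsi
    · exact h2 k hk h'
  | (p, t) :: rest =>
    obtain ⟨_, h2, h3, h4, h5, h6, h7, h8⟩ := h
    refine ⟨by simp, by omega, h3, h4, h5, ?_, h7, h8⟩
    intro k hk hik hkp
    rcases Nat.eq_or_lt_of_le hik with h' | h'
    · subst h'; exact hwsi
    · exact h6 k hk h' hkp

theorem pvGood_strengthen (s : List Char) (e : Nat) (l : List (Nat × List Char))
    (hwse : ∀ (he : e < s.length), pvWS s[e] = true)
    (h : pvGood s false e l) : pvGood s true e l := by
  match l with
  | [] => exact h
  | (p, t) :: rest =>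
    obtain ⟨_, h2, h3, h4, h5, h6, h7, h8⟩ := h
    refine ⟨?_, h2, h3, h4, h5, h6, h7, h8⟩
    intro _
    rcases Nat.eq_or_lt_of_le h2 with h' | h'
    · exfalso
      subst h'
      have hplen : e < s.length := by
        have := List.length_pos_iff.mpr h4
        omega
      have hhead : t.head? = some s[e] := by
        rw [← h7, List.head?_take, List.head?_drop]
        have hlt : 0 < t.length := List.length_pos_iff.mpr h4
        simp [List.getElem?_eq_getElem hplen, hlt.ne']
      have hmem : s[e] ∈ t := by
        exact List.mem_of_mem_head? (by rw [hhead]; rfl)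
      have := h5 _ hmem
      rw [hwse hplen] at this
      exact absurd this (by simp)
    · exact h'

theorem pvGood_lex (s : List Char) (i : Nat) (hi : i ≤ s.length) :
    pvGood s false i (pvLex s i) := by
  fun_induction pvLex s i with
  | case1 i h hws ih =>
    exact pvGood_weaken s i _ h hws (ih (by omega))
  | case2 i h hws t ih =>
    have hdrop : s.drop i = s[i] :: s.drop (i + 1) := List.drop_eq_getElem_cons h
    have htlen1 : 1 ≤ t.length := by
      show 1 ≤ ((s.drop i).takeWhile (fun c => !pvWS c)).length
      rw [hdrop, List.takeWhile_cons]
      split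
      · simp
      · simp_all
    have htlen : t.length ≤ s.length - i := by
      have h2 : ((s.drop i).takeWhile (fun c => !pvWS c)).length ≤ (s.drop i).length :=
        (List.takeWhile_sublist _).length_le
      simpa using h2
    have htake : (s.drop i).take t.length = t :=
      (List.prefix_iff_eq_take.mp (List.takeWhile_prefix _)).symm
    have htws : ∀ c ∈ t, pvWS c = false := by
      intro c hc
      have := List.mem_takeWhile_imp hc
      simpa using this
    refine ⟨by simp, le_refl i, by omega, ?_, htws, by omega, htake, ?_⟩
    · intro hnil; rw [hnil] at htlen1; simp at htlen1
    · refine pvGood_strengthen s _ _ ?_ (ih (by omega))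
      intro he
      -- s[i + t.length] is the head of dropWhile, so it is whitespace
      have hd : List.dropWhile (fun c => !pvWS c) (s.drop i) = s.drop (i + t.length) := by
        have h0 := List.takeWhile_append_dropWhile (p := fun c => !pvWS c) (l := s.drop i)
        have h1 : List.drop t.length (s.drop i) = List.dropWhile (fun c => !pvWS c) (s.drop i) := by
          conv_lhs => rw [← h0]
          exact List.drop_left' rfl
        rw [← h1, List.drop_drop]
      have hhead : (s.drop (i + t.length)).head? = some s[i + t.length] := by
        rw [List.head?_drop, List.getElem?_eq_getElem he]
      rw [← hd] at hhead
      have := List.head?_dropWhile_not (fun c => !pvWS c) (s.drop i)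
      rw [hhead] at this
      simpa using this
  | case3 i h =>
    simp only [not_lt] at h
    exact ⟨hi, fun k hk hik => absurd hk (by omega)⟩

theorem pvDropWhile_drop (s : List Char) (i : Nat) :
    (s.drop i).dropWhile (fun c => !pvWS c)
      = s.drop (i + ((s.drop i).takeWhile (fun c => !pvWS c)).length) := by
  have h1 := List.drop_left' (l₁ := (s.drop i).takeWhile (fun c => !pvWS c))
    (l₂ := (s.drop i).dropWhile (fun c => !pvWS c)) rfl
  rw [List.takeWhile_append_dropWhile] at h1
  rw [← h1, List.drop_drop]

theorem pvWS_head_drop (s : List Char) (i : Nat)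
    (he : i + ((s.drop i).takeWhile (fun c => !pvWS c)).length < s.length) :
    pvWS s[i + ((s.drop i).takeWhile (fun c => !pvWS c)).length] = true := by
  have hd := pvDropWhile_drop s i
  have hhead : (s.drop (i + ((s.drop i).takeWhile (fun c => !pvWS c)).length)).head?
      = some s[i + ((s.drop i).takeWhile (fun c => !pvWS c)).length] := by
    rw [List.head?_drop, List.getElem?_eq_getElem he]
  rw [← hd] at hhead
  have := List.head?_dropWhile_not (fun c => !pvWS c) (s.drop i)
  rw [hhead] at this
  simpa using this

theorem pvGo_take (l : List Char) (cur : List Char) (acc : List (List Char)) :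
    PySem.Chars.split₀.go l cur acc
      = PySem.Chars.split₀.go (l.dropWhile (fun c => !pvWS c))
          ((l.takeWhile (fun c => !pvWS c)).reverse ++ cur) acc := by
  induction l generalizing cur with
  | nil => simp
  | cons c r ih =>
    by_cases hc : pvWS c = true
    · simp [hc]
    · rw [PySem.Chars.split₀.go.eq_def]
      simp only [List.dropWhile_cons, List.takeWhile_cons, hc]
      have hc' : PySem.Chars.isspace c = false := by simpa [pvWS] using hc
      simp only [hc', Bool.false_eq_true, if_false, Bool.not_false, if_true]
      rw [ih (c :: cur)]
      simp

theorem pvGo_lex (s : List Char) (i : Nat) :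
    ∀ acc : List (List Char), PySem.Chars.split₀.go (s.drop i) [] acc
      = acc.reverse ++ (pvLex s i).map Prod.snd := by
  fun_induction pvLex s i with
  | case1 i h hws ih =>
    intro acc
    have hdrop : s.drop i = s[i] :: s.drop (i + 1) := List.drop_eq_getElem_cons h
    have hws' : PySem.Chars.isspace s[i] = true := hws
    rw [hdrop, PySem.Chars.split₀.go.eq_def]
    simp only [hws', if_true, List.isEmpty_nil]
    exact ih acc
  | case2 i h hws t ih =>
    intro acc
    have htne : t ≠ [] := by
      have hdrop : s.drop i = s[i] :: s.drop (i + 1) := List.drop_eq_getElem_cons h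
      show ((s.drop i).takeWhile (fun c => !pvWS c)) ≠ []
      rw [hdrop, List.takeWhile_cons]
      split
      · simp
      · simp_all
    have hstep : PySem.Chars.split₀.go (s.drop i) [] acc
        = PySem.Chars.split₀.go (s.drop (i + t.length)) t.reverse acc := by
      rw [pvGo_take, pvDropWhile_drop]
      simp only [List.append_nil]
      rfl
    rw [hstep]
    have hrevne : t.reverse.isEmpty = false := by
      simp [htne]
    by_cases he : i + t.length < s.length
    · have hwend : pvWS s[i + t.length] = true := pvWS_head_drop s i he
      have hdrop2 : s.drop (i + t.length) = s[i + t.length] :: s.drop (i + t.length + 1) :=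
        List.drop_eq_getElem_cons he
      have hwend' : PySem.Chars.isspace s[i + t.length] = true := hwend
      rw [hdrop2, PySem.Chars.split₀.go.eq_def]
      simp only [hwend', if_true, hrevne, Bool.false_eq_true, if_false, List.reverse_reverse]
      have hih := ih (t :: acc)
      rw [hdrop2, PySem.Chars.split₀.go.eq_def] at hih
      simp only [hwend', if_true, List.isEmpty_nil] at hih
      rw [hih]
      simp
    · have hdrop2 : s.drop (i + t.length) = [] := by
        apply List.drop_eq_nil_of_le
        omega
      rw [hdrop2, PySem.Chars.split₀.go.eq_def]
      simp only [hrevne, Bool.false_eq_true, if_false, List.reverse_reverse]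
      have hlex : pvLex s (i + t.length) = [] := by
        rw [pvLex.eq_def]
        simp [dif_neg he]
      rw [hlex]
      simp
  | case3 i h =>
    intro acc
    have hdrop : s.drop i = [] := by
      apply List.drop_eq_nil_of_le
      omega
    rw [hdrop, PySem.Chars.split₀.go.eq_def]
    simp

theorem pvLex_split₀ (s : List Char) :
    PySem.Chars.split₀ s = (pvLex s 0).map Prod.snd := by
  have := pvGo_lex s 0 []
  simpa [PySem.Chars.split₀] using this

-- --- arithmetic helpers for ranges ---

theorem pvPyRange_cast (n : Nat) :
    PySem.List.pyRange 0 (n : Int) = (List.range n).map Nat.cast := by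
  induction n with
  | zero =>
    simp
  | succ n ih =>
    have hsplit := PySem.List.pyRange_one_append 0 (n : Int) ((n : Int) + 1)
      (by positivity) (by omega)
    have hlast : PySem.List.pyRange (n : Int) ((n : Int) + 1) = [(n : Int)] := by
      have hl : (PySem.List.pyRange (n : Int) ((n : Int) + 1)).length = 1 := by
        rw [PySem.List.length_pyRange_one]; simp
      obtain ⟨a, ha⟩ := List.length_eq_one_iff.mp hl
      have hg := PySem.List.getElem?_pyRange_one (n : Int) ((n : Int) + 1) 0
      rw [ha] at hg
      simp at hg
      rw [ha, hg]
    have : ((n : Int) + 1) = ((n + 1 : Nat) : Int) := by push_cast; ring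
    rw [← this, hsplit, hlast, ih, List.range_succ]
    simp

theorem pvMap_pyRange (p n : Nat) :
    (PySem.List.pyRange 0 ((n : Nat) : Int)).map (fun k => ((p : Int) + k)) = pvRangeOffs p n := by
  rw [pvPyRange_cast, pvRangeOffs, List.map_map]
  apply List.map_congr_left
  intro k _
  show (p : Int) + (k : Int) = _
  push_cast
  ring

theorem pvRangeOffs_succ (p n : Nat) :
    pvRangeOffs p (n + 1) = (p : Int) :: pvRangeOffs (p + 1) n := by
  refine List.ext_getElem (by simp [pvRangeOffs]) ?_
  intro i h1 h2
  rcases i with _ | i <;> simp [pvRangeOffs] <;> omega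

theorem pvGetLastD_cons (x : Nat × List Char) (rest : List (Nat × List Char))
    (f : Nat × List Char → Nat) (e : Nat) :
    (((x :: rest).getLast?).map f).getD e = ((rest.getLast?.map f).getD (f x)) := by
  cases rest with
  | nil => simp
  | cons y l =>
    rw [List.getLast?_cons_cons]
    rw [List.getLast?_eq_some_getLast (l := y :: l) (by simp)]
    simp

-- --- the backtracking while loop returns pos ---

theorem pvWsBack_eq (S : String) (s : List Char) (hs : S.toList = s)
    (hdom : ∀ c ∈ s, pvDomChar c = true) (e p : Nat) (hep : e ≤ p) (hpl : p ≤ s.length)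
    (hws : ∀ (k : Nat) (hk : k < s.length), e ≤ k → k < p → pvWS s[k] = true) :
    pvWsBack S (e : Int) ((p : Int) - 1) = (e : Int) := by
  induction p with
  | zero =>
    have he0 : e = 0 := Nat.le_zero.mp hep
    subst he0
    rw [pvWsBack, dif_neg (by simp)]
    simp
  | succ p ih =>
    rcases Nat.eq_or_lt_of_le hep with h' | h'
    · rw [pvWsBack, dif_neg (by push_cast; omega)]
      push_cast
      omega
    · have hep' : e ≤ p := by omega
      have hplt : p < s.length := by omega
      have hwp : pvWS s[p] = true := hws p hplt hep' (by omega)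
      have hdp : pvDomChar s[p] = true := hdom _ (List.getElem_mem hplt)
      have hmem := pvWsChar_mem _ hdp hwp
      have harg : ((p + 1 : Nat) : Int) - 1 = ((p : Nat) : Int) := by push_cast; omega
      have hcond : ((e : Nat) : Int) ≤ ((p + 1 : Nat) : Int) - 1 ∧
          ((PySem.Str.pyGet? S (((p + 1 : Nat) : Int) - 1)).any fun c =>
            decide (c = ' ' ∨ c = '\t' ∨ c = '\n' ∨ c = '\r')) = true := by
        constructor
        · push_cast; omega
        · rw [harg, PySem.Str.pyGet?_eq, hs]
          show (PySem.List.pyGet? s ((p : Nat) : Int)).any _ = true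
          rw [PySem.List.pyGet?_natCast, List.getElem?_eq_getElem hplt]
          rcases hmem with h | h | h | h <;> simp [h]
      rw [pvWsBack, dif_pos hcond]
      have harg2 : ((p + 1 : Nat) : Int) - 1 - 1 = ((p : Nat) : Int) - 1 := by push_cast; omega
      rw [harg2]
      exact ih hep' (by omega) (fun k hk h1 h2 => hws k hk h1 (by omega))

-- --- find() locates the next token exactly at its lexed position ---

theorem pvFindFrom_eq (s t : List Char) (e p : Nat) (hep : e ≤ p)
    (hlen : p + t.length ≤ s.length) (ht : (s.drop p).take t.length = t) (htne : t ≠ [])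
    (htws : ∀ c ∈ t, pvWS c = false)
    (hws : ∀ (k : Nat) (hk : k < s.length), e ≤ k → k < p → pvWS s[k] = true) :
    PySem.Chars.findFrom s t ((e : Nat) : Int) = ((p : Nat) : Int) := by
  have htlen : 0 < t.length := List.length_pos_iff.mpr htne
  have hpre : t <+: s.drop p := List.prefix_iff_eq_take.mpr ht.symm
  -- no occurrence strictly before p
  have hno : ∀ q, e ≤ q → q < p → ¬ t <+: s.drop q := by
    intro q hq1 hq2 hq
    have hqlt : q < s.length := by omega
    have hhead : t.head? = some s[q] := by
      rw [List.prefix_iff_eq_take.mp hq, List.head?_take, List.head?_drop,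
        List.getElem?_eq_getElem hqlt]
      simp [htlen.ne']
    have hmem : s[q] ∈ t := List.mem_of_mem_head? (by rw [hhead]; rfl)
    have h1 := htws _ hmem
    have h2 := hws q hqlt hq1 hq2
    rw [h2] at h1
    exact absurd h1 (by simp)
  -- occurrence at p - e within s.drop e
  have hocc : t <+: (s.drop e).drop (p - e) := by
    rw [List.drop_drop]
    have : e + (p - e) = p := by omega
    rw [this]
    exact hpre
  have hinf : t <:+: s.drop e :=
    hocc.isInfix.trans (List.drop_suffix _ _).isInfix
  have hnn : 0 ≤ PySem.Chars.find (s.drop e) t :=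
    (PySem.Chars.find_nonneg_iff _ _).mpr hinf
  obtain ⟨hat, hmin⟩ := PySem.Chars.find_spec hnn
  have hm : (PySem.Chars.find (s.drop e) t).toNat = p - e := by
    rcases Nat.lt_trichotomy (PySem.Chars.find (s.drop e) t).toNat (p - e) with h | h | h
    · exfalso
      rw [List.drop_drop] at hat
      exact hno (e + (PySem.Chars.find (s.drop e) t).toNat) (by omega) (by omega) hat
    · exact h
    · exact absurd hocc (hmin _ h)
  have hfind : PySem.Chars.find (s.drop e) t = ((p - e : Nat) : Int) := by
    rw [← hm, Int.toNat_of_nonneg hnn]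
  rw [PySem.Chars.findFrom_natCast s t e (by omega), hfind]
  rw [if_neg (by omega)]
  push_cast
  omega

-- A's fold over all tokens after the first
theorem pvAfold (S : String) (s : List Char) (hs : S.toList = s)
    (hdom : ∀ c ∈ s, pvDomChar c = true) :
    ∀ (toks : List (Nat × List Char)) (e : Nat) (j : Int) (acc : List Int),
    pvGood s true e toks → 1 ≤ j →
    (PySem.List.enumerate (toks.map (fun pt => String.ofList pt.2)) j).foldl
      (pvStepA S) (acc, (e : Int))
    = (acc ++ pvTailOffs e toks,
       (((toks.getLast?.map (fun pt => pt.1 + pt.2.length)).getD e : Nat) : Int)) := by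
  intro toks
  induction toks with
  | nil =>
    intro e j acc hg hj
    simp [pvTailOffs]
  | cons x rest ih =>
    intro e j acc hg hj
    obtain ⟨p, t⟩ := x
    obtain ⟨hstrict, hep, hlen, htne, htws, hws, htake, hrest⟩ := hg
    rw [List.map_cons, PySem.List.enumerate_cons, List.foldl_cons]
    have hidx : PySem.Str.findFrom S (String.ofList t) ((e : Nat) : Int) = ((p : Nat) : Int) := by
      rw [PySem.Str.findFrom_eq, hs, String.toList_ofList]
      exact pvFindFrom_eq s t e p hep hlen htake htne htws hws
    have hlen' : PySem.Str.len (String.ofList t) = ((t.length : Nat) : Int) := by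
      rw [PySem.Str.len_eq, String.toList_ofList]
    have hstep : pvStepA S (acc, (e : Int)) (j, String.ofList t)
        = (acc ++ (e : Int) :: pvRangeOffs p t.length, ((p + t.length : Nat) : Int)) := by
      rw [pvStepA]
      simp only [hidx, hlen']
      rw [if_neg (by omega), if_pos (by simpa using hj)]
      rw [pvWsBack_eq S s hs hdom e p hep (by omega) hws, pvMap_pyRange]
      rw [Prod.mk.injEq]
      constructor
      · simp
      · push_cast; ring
    rw [hstep, ih (p + t.length) (j + 1) _ hrest (by omega)]
    rw [pvTailOffs, pvGetLastD_cons]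
    simp

-- B's fold over all tokens after the first

theorem pvB_ws_keep (l : List Char) :
    ∀ (n : Int) (norm : List Char) (offs : List Int) (r0 : Option Int),
    (∀ c ∈ l, pvWS c = true) → (norm = [] ∨ r0 ≠ none) →
    List.foldl pvStepB (norm, offs, r0) (PySem.List.enumerate l n) = (norm, offs, r0) := by
  induction l with
  | nil => intro n norm offs r0 _ _; simp
  | cons c l ih =>
    intro n norm offs r0 hws hcase
    rw [PySem.List.enumerate_cons, List.foldl_cons]
    have hc : PySem.Str.isspace c = true := hws c (by simp)
    have hstep : pvStepB (norm, offs, r0) (n, c) = (norm, offs, r0) := by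
      rw [pvStepB, if_pos hc]
      rcases hcase with h | h
      · subst h; simp
      · rw [if_neg (by simp [Option.isNone_iff_eq_none, h])]
    rw [hstep]
    exact ih (n + 1) norm offs r0 (fun c hc => hws c (by simp [hc])) hcase

theorem pvB_ws_start (l : List Char) (n : Int) (norm : List Char) (offs : List Int)
    (hws : ∀ c ∈ l, pvWS c = true) (hnorm : norm ≠ []) (hl : l ≠ []) :
    List.foldl pvStepB (norm, offs, none) (PySem.List.enumerate l n) = (norm, offs, some n) := by
  match l, hl with
  | c :: l, _ =>
    rw [PySem.List.enumerate_cons, List.foldl_cons]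
    have hc : PySem.Str.isspace c = true := hws c (by simp)
    have hstep : pvStepB (norm, offs, none) (n, c) = (norm, offs, some n) := by
      rw [pvStepB, if_pos hc, if_pos (by simp [hnorm])]
    rw [hstep]
    exact pvB_ws_keep l (n + 1) norm offs (some n) (fun c hc => hws c (by simp [hc]))
      (Or.inr (by simp))

theorem pvB_tok (t : List Char) :
    ∀ (n : Nat) (norm : List Char) (offs : List Int),
    (∀ c ∈ t, pvWS c = false) →
    List.foldl pvStepB (norm, offs, none) (PySem.List.enumerate t (n : Int))
      = (norm ++ t, offs ++ pvRangeOffs n t.length, none) := by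
  induction t with
  | nil => intro n norm offs _; simp [pvRangeOffs]
  | cons c t ih =>
    intro n norm offs hws
    rw [PySem.List.enumerate_cons, List.foldl_cons]
    have hc : PySem.Str.isspace c = false := hws c (by simp)
    have hstep : pvStepB (norm, offs, none) ((n : Int), c)
        = (norm ++ [c], offs ++ [(n : Int)], none) := by
      rw [pvStepB, if_neg (by simp [hc])]
    rw [hstep]
    have hcast : ((n : Nat) : Int) + 1 = ((n + 1 : Nat) : Int) := by push_cast; ring
    rw [hcast, ih (n + 1) _ _ (fun c hc => hws c (by simp [hc]))]
    rw [List.length_cons, pvRangeOffs_succ]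
    simp

theorem pvBfold (s : List Char) :
    ∀ (toks : List (Nat × List Char)) (e : Nat)
    (_ : pvGood s true e toks) (norm : List Char) (offs : List Int) (_ : norm ≠ []),
    ∃ r, (PySem.List.enumerate (s.drop e) (e : Int)).foldl pvStepB (norm, offs, none)
    = (norm ++ pvTailNorm toks, offs ++ pvTailOffs e toks, r) := by
  intro toks
  induction toks with
  | nil =>
    intro e hg norm offs hnorm
    obtain ⟨hel, hwsall⟩ := hg
    have hall : ∀ c ∈ s.drop e, pvWS c = true := by
      intro c hc
      obtain ⟨j, hj, rfl⟩ := List.mem_iff_getElem.mp hc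
      rw [List.getElem_drop]
      exact hwsall (e + j) (by simp at hj; omega) (by omega)
    cases hdrop : s.drop e with
    | nil =>
      refine ⟨none, ?_⟩
      simp [pvTailNorm, pvTailOffs]
    | cons c l =>
      refine ⟨some (e : Int), ?_⟩
      rw [pvB_ws_start _ _ _ _ (by rw [← hdrop]; exact hall) hnorm (by simp)]
      simp [pvTailNorm, pvTailOffs]
  | cons x rest ih =>
    intro e hg norm offs hnorm
    obtain ⟨p, t⟩ := x
    obtain ⟨hstrict, hep, hlen, htne, htws, hws, htake, hrest⟩ := hg
    have hlt : e < p := hstrict rfl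
    have htlen : 0 < t.length := List.length_pos_iff.mpr htne
    -- decompose the suffix into whitespace gap ++ token ++ rest
    have hdropp : s.drop p = t ++ s.drop (p + t.length) := by
      conv_lhs => rw [← List.take_append_drop t.length (s.drop p)]
      rw [htake, List.drop_drop]
    have hgaplen : ((s.drop e).take (p - e)).length = p - e := by
      rw [List.length_take, List.length_drop]
      omega
    have hsplit : s.drop e = (s.drop e).take (p - e) ++ (t ++ s.drop (p + t.length)) := by
      conv_lhs => rw [← List.take_append_drop (p - e) (s.drop e)]
      rw [List.drop_drop]
      have : e + (p - e) = p := by omega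
      rw [this, hdropp]
    have hgapws : ∀ c ∈ (s.drop e).take (p - e), pvWS c = true := by
      intro c hc
      obtain ⟨j, hj, rfl⟩ := List.mem_iff_getElem.mp hc
      rw [List.getElem_take, List.getElem_drop]
      have hjlt : j < p - e := by rw [hgaplen] at hj; exact hj
      exact hws (e + j) (by omega) (by omega) (by omega)
    obtain ⟨c₀, t₁, rfl⟩ := List.exists_cons_of_ne_nil htne
    -- walk the fold through the three segments
    rw [hsplit, PySem.List.enumerate_append, List.foldl_append, hgaplen]
    rw [pvB_ws_start _ _ _ _ hgapws hnorm
      (by intro h; rw [h] at hgaplen; simp at hgaplen; omega)]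
    have hcast1 : (e : Int) + ((p - e : Nat) : Int) = (p : Int) := by push_cast; omega
    rw [hcast1, List.cons_append, PySem.List.enumerate_cons, List.foldl_cons]
    have hc₀ : PySem.Str.isspace c₀ = false := htws c₀ (by simp)
    have hstep : pvStepB (norm, offs, some (e : Int)) ((p : Int), c₀)
        = (norm ++ [' ', c₀], offs ++ [(e : Int), (p : Int)], none) := by
      rw [pvStepB, if_neg (by simp [hc₀])]
    rw [hstep]
    have hcast2 : ((p : Nat) : Int) + 1 = ((p + 1 : Nat) : Int) := by push_cast; ring
    rw [hcast2, PySem.List.enumerate_append, List.foldl_append]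
    rw [pvB_tok t₁ (p + 1) _ _ (fun c hc => htws c (by simp [hc]))]
    have hcast3 : ((p + 1 : Nat) : Int) + (t₁.length : Int) = ((p + (c₀ :: t₁).length : Nat) : Int) := by
      simp
      ring
    rw [hcast3]
    obtain ⟨r, hr⟩ := ih (p + (c₀ :: t₁).length) hrest
      (norm ++ [' ', c₀] ++ t₁) (offs ++ [(e : Int), (p : Int)] ++ pvRangeOffs (p + 1) t₁.length)
      (by simp)
    refine ⟨r, ?_⟩
    rw [hr]
    rw [pvTailNorm, pvTailOffs, List.length_cons, pvRangeOffs_succ]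
    simp

-- --- glue: the joined string and the length check ---

theorem pvJoin_norm (t0 : List Char) (rest : List (Nat × List Char)) :
    PySem.Chars.join [' '] (t0 :: rest.map Prod.snd) = t0 ++ pvTailNorm rest := by
  induction rest generalizing t0 with
  | nil => simp [pvTailNorm, PySem.Chars.join_singleton]
  | cons x r ih =>
    rw [List.map_cons, PySem.Chars.join_cons_cons, ih x.2]
    rw [pvTailNorm]
    simp

theorem pvLen_eq (toks : List (Nat × List Char)) :
    ∀ e, (pvTailOffs e toks).length = (pvTailNorm toks).length := by
  induction toks with
  | nil => intro e; rfl
  | cons x r ih =>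
    intro e
    obtain ⟨p, t⟩ := x
    rw [pvTailOffs, pvTailNorm]
    simp [pvRangeOffs, ih]

-- the whole result of both programs, as a function of the token list
def pvAllNorm : List (Nat × List Char) → List Char
  | [] => []
  | (_, t) :: rest => t ++ pvTailNorm rest

def pvAllOffs : List (Nat × List Char) → List Int
  | [] => []
  | (p, t) :: rest => pvRangeOffs p t.length ++ pvTailOffs (p + t.length) rest

-- B's fold over the whole string
theorem pvBfold0 (s : List Char) (toks : List (Nat × List Char)) (e : Nat)
    (hg : pvGood s false e toks) :
    ∃ r, (PySem.List.enumerate (s.drop e) (e : Int)).foldl pvStepB ([], [], none)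
      = (pvAllNorm toks, pvAllOffs toks, r) := by
  cases toks with
  | nil =>
    obtain ⟨hel, hwsall⟩ := hg
    refine ⟨none, ?_⟩
    have hall : ∀ c ∈ s.drop e, pvWS c = true := by
      intro c hc
      obtain ⟨j, hj, rfl⟩ := List.mem_iff_getElem.mp hc
      rw [List.getElem_drop]
      exact hwsall (e + j) (by simp at hj; omega) (by omega)
    rw [pvB_ws_keep _ _ _ _ _ hall (Or.inl rfl)]
    rfl
  | cons x rest =>
    obtain ⟨p, t⟩ := x
    obtain ⟨_, hep, hlen, htne, htws, hws, htake, hrest⟩ := hg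
    have htlen : 0 < t.length := List.length_pos_iff.mpr htne
    have hdropp : s.drop p = t ++ s.drop (p + t.length) := by
      conv_lhs => rw [← List.take_append_drop t.length (s.drop p)]
      rw [htake, List.drop_drop]
    have hgaplen : ((s.drop e).take (p - e)).length = p - e := by
      rw [List.length_take, List.length_drop]
      omega
    have hsplit : s.drop e = (s.drop e).take (p - e) ++ (t ++ s.drop (p + t.length)) := by
      conv_lhs => rw [← List.take_append_drop (p - e) (s.drop e)]
      rw [List.drop_drop]
      have : e + (p - e) = p := by omega
      rw [this, hdropp]
    have hgapws : ∀ c ∈ (s.drop e).take (p - e), pvWS c = true := by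
      intro c hc
      obtain ⟨j, hj, rfl⟩ := List.mem_iff_getElem.mp hc
      rw [List.getElem_take, List.getElem_drop]
      have hjlt : j < p - e := by rw [hgaplen] at hj; exact hj
      exact hws (e + j) (by omega) (by omega) (by omega)
    obtain ⟨c₀, t₁, rfl⟩ := List.exists_cons_of_ne_nil htne
    rw [hsplit, PySem.List.enumerate_append, List.foldl_append, hgaplen]
    rw [pvB_ws_keep _ _ _ _ _ hgapws (Or.inl rfl)]
    have hcast1 : (e : Int) + ((p - e : Nat) : Int) = (p : Int) := by push_cast; omega
    rw [hcast1, List.cons_append, PySem.List.enumerate_cons, List.foldl_cons]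
    have hc₀ : PySem.Str.isspace c₀ = false := htws c₀ (by simp)
    have hstep : pvStepB ([], [], none) ((p : Int), c₀) = ([c₀], [(p : Int)], none) := by
      rw [pvStepB, if_neg (by simp [hc₀])]
      rfl
    rw [hstep]
    have hcast2 : ((p : Nat) : Int) + 1 = ((p + 1 : Nat) : Int) := by push_cast; ring
    rw [hcast2, PySem.List.enumerate_append, List.foldl_append]
    rw [pvB_tok t₁ (p + 1) _ _ (fun c hc => htws c (by simp [hc]))]
    have hcast3 : ((p + 1 : Nat) : Int) + (t₁.length : Int)
        = ((p + (c₀ :: t₁).length : Nat) : Int) := by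
      simp
      ring
    rw [hcast3]
    obtain ⟨r, hr⟩ := pvBfold s rest (p + (c₀ :: t₁).length) hrest
      ([c₀] ++ t₁) ([(p : Int)] ++ pvRangeOffs (p + 1) t₁.length) (by simp)
    refine ⟨r, ?_⟩
    rw [hr]
    rw [pvAllNorm, pvAllOffs, List.length_cons, pvRangeOffs_succ]
    simp

-- A's and B's results both equal the token-list formulas
theorem pvMain (S : String) (hdom : ∀ c ∈ S.toList, pvDomChar c = true) :
    normalized_char_offset_map S = normalized_char_offset_map_alt S := by
  have hlex0 := pvGood_lex S.toList 0 (by omega)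
  have hparts : (PySem.Str.split₀ S).map String.toList = (pvLex S.toList 0).map Prod.snd := by
    rw [PySem.Str.split₀_map_toList]
    exact pvLex_split₀ _
  have hparts' : PySem.Str.split₀ S = (pvLex S.toList 0).map (fun pt => String.ofList pt.2) := by
    have h1 : PySem.Str.split₀ S = ((PySem.Str.split₀ S).map String.toList).map String.ofList := by
      rw [List.map_map]
      simp [Function.comp_def, String.ofList_toList]
    rw [h1, hparts, List.map_map]
    rfl
  -- B's result
  have hB : ∃ r, (PySem.List.enumerate S.toList 0).foldl pvStepB ([], [], none)
      = (pvAllNorm (pvLex S.toList 0), pvAllOffs (pvLex S.toList 0), r) := by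
    have h0 : S.toList = S.toList.drop 0 := rfl
    have h1 : (0 : Int) = ((0 : Nat) : Int) := rfl
    rw [h0, h1]
    exact pvBfold0 S.toList _ 0 hlex0
  obtain ⟨r, hB⟩ := hB
  cases hlexc : pvLex S.toList 0 with
  | nil =>
    rw [hlexc] at hparts' hB
    rw [normalized_char_offset_map, normalized_char_offset_map_alt]
    rw [hparts']
    simp only [List.map_nil]
    rw [hB]
    rfl
  | cons x rest =>
    obtain ⟨p0, t0⟩ := x
    rw [hlexc] at hparts' hB hlex0
    obtain ⟨_, hep0, hlen0, htne0, htws0, hws0, htake0, hrest0⟩ := hlex0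
    -- evaluate A
    have hidx0 : PySem.Str.findFrom S (String.ofList t0) ((0 : Nat) : Int) = ((p0 : Nat) : Int) := by
      rw [PySem.Str.findFrom_eq, String.toList_ofList]
      exact pvFindFrom_eq S.toList t0 0 p0 (by omega) hlen0 htake0 htne0 htws0 hws0
    have hlen0' : PySem.Str.len (String.ofList t0) = ((t0.length : Nat) : Int) := by
      rw [PySem.Str.len_eq, String.toList_ofList]
    have hstep0 : pvStepA S ([], 0) (0, String.ofList t0)
        = (pvRangeOffs p0 t0.length, ((p0 + t0.length : Nat) : Int)) := by
      have hidx0' : PySem.Str.findFrom S (String.ofList t0) (0 : Int) = ((p0 : Nat) : Int) := by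
        rw [show (0 : Int) = ((0 : Nat) : Int) from rfl]
        exact hidx0
      simp only [pvStepA, hidx0', hlen0']
      rw [if_neg (by omega), if_neg (by omega)]
      rw [pvMap_pyRange, Prod.mk.injEq]
      constructor
      · simp
      · push_cast; ring
    have hA1 : (PySem.List.enumerate
          (String.ofList t0 :: rest.map (fun pt => String.ofList pt.2)) 0).foldl
          (pvStepA S) ([], 0)
        = (pvRangeOffs p0 t0.length ++ pvTailOffs (p0 + t0.length) rest,
           (((rest.getLast?.map (fun pt => pt.1 + pt.2.length)).getD (p0 + t0.length) : Nat) : Int)) := by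
      rw [PySem.List.enumerate_cons, List.foldl_cons, hstep0]
      rw [show (0 : Int) + 1 = 1 from rfl]
      exact pvAfold S S.toList rfl hdom rest (p0 + t0.length) 1 _ hrest0 (by omega)
    have hnorml : (PySem.Str.join " "
          (String.ofList t0 :: rest.map (fun pt => String.ofList pt.2))).toList
        = t0 ++ pvTailNorm rest := by
      rw [PySem.Str.toList_join, List.map_cons, List.map_map]
      have : (String.toList ∘ fun pt => String.ofList pt.2)
          = fun (pt : Nat × List Char) => pt.2 := by
        funext pt
        simp [String.toList_ofList]
      rw [this]
      simpa using pvJoin_norm t0 rest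
    have hlength : ((pvRangeOffs p0 t0.length ++ pvTailOffs (p0 + t0.length) rest).length : Int)
        = PySem.Str.len (PySem.Str.join " "
            (String.ofList t0 :: rest.map (fun pt => String.ofList pt.2))) := by
      rw [PySem.Str.len_eq, hnorml]
      simp [pvRangeOffs, pvLen_eq]
    rw [normalized_char_offset_map, normalized_char_offset_map_alt]
    rw [hparts', List.map_cons]
    rw [if_neg (by simp)]
    rw [hA1, hB]
    simp only [pvAllNorm, pvAllOffs]
    rw [if_neg (by rw [hlength]; simp)]
    rw [Prod.mk.injEq]
    constructor
    · apply String.toList_injective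
      rw [hnorml, String.toList_ofList]
    · rfl

-- ===== VERDICT (by name: the statement is the Claim_ definition above) =====
theorem normalized_char_offset_map_spec : Claim_equal_normalized_char_offset_map := by
  intro S hdom
  show _ = _
  exact pvMain S (List.all_eq_true.mp hdom)
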